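-- pv_equiv track=rewrite | github.com/juliyamakutu/python_again | Bryukhovskikh_Yuliya_dz_5/task_5_3.py | check_gen
-- ===== SOURCE A (Python) =====
-- from typing import Generator, List, Tuple
--
-- def check_gen(tutors: List[str], klasses: List[str]) -> Generator[Tuple[str], None, None]:
--     for i in range(len(tutors)):
--         tutor = tutors[i]
--         if i < len(klasses):
--             klass = klasses[i]
--         else:
--             klass = None
--         yield (tutor, klass)
-- ===== SOURCE B (Python) =====
-- from typing import Generator, List, Tuple
--
-- def check_gen(tutors: List[str], klasses: List[str]) -> Generator[Tuple[str], None, None]: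
--     for pair in zip(tutors, klasses):
--         yield pair
--     for tutor in tutors[len(klasses):]:
--         yield (tutor, None)
-- ===== Notes on version B (the rewrite author's own statement) =====
-- stated objective: idiomatic
-- what changed: Replaces the single index loop with its in-range conditional by two branch-free passes: zip for the paired prefix, then a slice from len(klasses) for the None-padded tail.
import Mathlib
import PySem

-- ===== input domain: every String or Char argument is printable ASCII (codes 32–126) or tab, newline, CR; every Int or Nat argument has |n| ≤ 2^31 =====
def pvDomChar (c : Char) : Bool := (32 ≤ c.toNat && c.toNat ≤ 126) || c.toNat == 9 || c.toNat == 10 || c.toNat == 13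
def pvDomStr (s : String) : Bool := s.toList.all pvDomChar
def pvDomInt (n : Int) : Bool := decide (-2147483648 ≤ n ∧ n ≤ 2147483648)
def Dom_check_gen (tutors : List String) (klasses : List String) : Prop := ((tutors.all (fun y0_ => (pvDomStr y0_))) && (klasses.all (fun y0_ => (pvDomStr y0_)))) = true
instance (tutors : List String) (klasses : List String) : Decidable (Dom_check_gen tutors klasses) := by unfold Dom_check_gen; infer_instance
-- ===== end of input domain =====

-- B replaces A's single index loop (with its in-range conditional) by two branch-free passes:
-- zip for the paired prefix, then the tutors tail from len(klasses) padded with None.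
-- Equivalence is about the sequence of yielded pairs (both generators materialised as lists).

-- ===== PORT A =====
-- for i in range(len(tutors)): tutor = tutors[i]; klass = klasses[i] if i < len(klasses) else None; yield (tutor, klass)
def check_gen (tutors : List String) (klasses : List String) : List (String × Option String) :=
  (PySem.List.pyRange 0 (PySem.List.len tutors) 1).foldl
    (fun acc i =>
      let tutor := PySem.List.pyGetD tutors i ""   -- i always in range here
      let klass : Option String :=
        if i < PySem.List.len klasses then some (PySem.List.pyGetD klasses i "") else none
      acc ++ [(tutor, klass)]) []

-- ===== PORT B =====
-- for pair in zip(tutors, klasses): yield pair; then for tutor in tutors[len(klasses):]: yield (tutor, None)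
-- (the slice tutors[len(klasses):] with a nonnegative bound is exactly List.drop klasses.length)
def check_gen_alt (tutors : List String) (klasses : List String) : List (String × Option String) :=
  (List.zip tutors klasses).map (fun p => (p.1, some p.2))
    ++ (tutors.drop klasses.length).map (fun t => (t, none))

-- ===== PRECONDITION & SPEC =====
def Spec_check_gen (tutors : List String) (klasses : List String) (out : List (String × Option String)) : Prop := out = check_gen_alt tutors klasses
instance (tutors : List String) (klasses : List String) (out : List (String × Option String)) : Decidable (Spec_check_gen tutors klasses out) := by unfold Spec_check_gen; infer_instance

-- ===== CLAIM (what is proved, stated in full; the proofs are below) =====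
def Claim_equal_check_gen : Prop := ∀ (tutors : List String) (klasses : List String), Dom_check_gen tutors klasses → Spec_check_gen tutors klasses (check_gen tutors klasses)

-- ===== LEMMAS AND PROOFS =====

-- A's per-index body, written over List.range / getD, produces exactly B's zip-then-pad list.
theorem gen_key (tutors klasses : List String) :
    (List.range tutors.length).map
      (fun k => (tutors.getD k "", if (k : Int) < (klasses.length : Int) then some (klasses.getD k "") else none))
      = check_gen_alt tutors klasses := by
  induction tutors generalizing klasses with
  | nil => simp [check_gen_alt]
  | cons t ts ih =>
    rw [List.length_cons, List.range_succ_eq_map, List.map_cons, List.map_map]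
    cases klasses with
    | nil =>
      have h := ih []
      simp only [check_gen_alt, List.zip_nil_right, List.map_nil, List.length_nil,
        List.drop_zero, List.nil_append, Nat.cast_zero] at h ⊢
      simp only [Function.comp_def, List.getD_cons_succ]
      rw [List.map_cons, List.cons_eq_cons]
      refine ⟨by simp, ?_⟩
      rw [← h]
      apply List.map_congr_left
      intro k _
      have h0 : ¬ ((k : Int) < 0) := by omega
      simp [h0]
      omega
    | cons c cs =>
      have h := ih cs
      simp only [check_gen_alt, List.zip_cons_cons, List.map_cons, List.length_cons,
        List.drop_succ_cons, List.cons_append] at h ⊢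
      rw [List.cons_eq_cons]
      refine ⟨by simp, ?_⟩
      rw [← h]
      apply List.map_congr_left
      intro k _
      simp only [Function.comp_def, List.getD_cons_succ]
      congr 1
      have h2 : ((k : Int) + 1 < (cs.length : Int) + 1) ↔ (k : Int) < (cs.length : Int) := by omega
      push_cast
      simp [h2]

theorem check_gen_eq_alt (tutors klasses : List String) :
    check_gen tutors klasses = check_gen_alt tutors klasses := by
  unfold check_gen
  rw [PySem.List.foldl_append_singleton_eq_map, PySem.List.len_eq, PySem.List.pyRange_one]
  rw [← gen_key tutors klasses]
  rw [List.map_map]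
  apply List.map_congr_left
  intro k hk
  simp at hk
  simp [PySem.List.pyGetD_natCast]

-- ===== VERDICT (by name: the statement is the Claim_ definition above) =====
theorem check_gen_spec : Claim_equal_check_gen := by
  intro tutors klasses _
  unfold Spec_check_gen
  exact check_gen_eq_alt tutors klasses
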